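-- pv_equiv track=rewrite | github.com/ccgd-profile/BreaKmer | sv_caller.py | dup_gene_names
-- ===== SOURCE A (Python) =====
-- def dup_gene_names(anno_genes) :
--   found_dup = False
--   for i in range(len(anno_genes)-1) :
--     g1 = anno_genes[i]
--     for g2 in anno_genes[(i+1):] :
--       if (g1.find(g2) > -1) or (g2.find(g1) > -1) :
--         found_dup = True
--   return found_dup
-- ===== SOURCE B (Python) =====
-- def dup_gene_names(anno_genes):
--     # Sort a copy by length; then only the one direction "shorter (earlier) is a
--     # substring of longer (later)" needs testing for each pair.
--     ordered = sorted(anno_genes, key=len)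
--     return any(ordered[j].find(ordered[i]) > -1
--                for i in range(len(ordered))
--                for j in range(i + 1, len(ordered)))
-- ===== Notes on version B (the rewrite author's own statement) =====
-- stated objective: faster
-- what changed: B sorts a copy of the list by length and tests each pair in only one direction (shorter-in-longer), returning via any's short-circuit on the first hit, instead of A's two-direction substring test over all pairs with no early exit.
import Mathlib
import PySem

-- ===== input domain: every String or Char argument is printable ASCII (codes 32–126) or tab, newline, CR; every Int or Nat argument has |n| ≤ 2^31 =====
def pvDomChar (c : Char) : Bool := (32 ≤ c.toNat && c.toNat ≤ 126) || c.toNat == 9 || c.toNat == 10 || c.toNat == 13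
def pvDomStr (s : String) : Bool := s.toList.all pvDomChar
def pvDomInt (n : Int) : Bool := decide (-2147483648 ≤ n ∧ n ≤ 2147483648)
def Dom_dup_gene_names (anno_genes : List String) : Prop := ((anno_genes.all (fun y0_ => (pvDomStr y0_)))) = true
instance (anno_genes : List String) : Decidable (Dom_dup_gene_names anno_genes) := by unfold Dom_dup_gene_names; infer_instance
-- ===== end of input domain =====

-- B sorts a copy of the list by length and tests each pair in one direction only
-- (shorter-or-equal earlier element inside longer-or-equal later element, with any's
-- early exit), instead of A's two-direction substring test over all pairs with no exit.

-- ===== PORT A =====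
def dup_gene_names (anno_genes : List String) : Bool :=
  (PySem.List.pyRange 0 ((anno_genes.length : Int) - 1) 1).foldl
    (fun found_dup i =>
      let g1 := PySem.List.pyGetD anno_genes i ""
      (PySem.List.slice anno_genes (some (i + 1)) none).foldl
        (fun fd g2 =>
          if PySem.Str.find g1 g2 > -1 || PySem.Str.find g2 g1 > -1 then true else fd)
        found_dup)
    false

-- ===== PORT B =====
def dup_gene_names_alt (anno_genes : List String) : Bool :=
  let ordered := PySem.List.sorted anno_genes (fun s => PySem.Str.len s)
  (PySem.List.pyRange 0 (ordered.length : Int) 1).any (fun i =>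
    (PySem.List.pyRange (i + 1) (ordered.length : Int) 1).any (fun j =>
      PySem.Str.find (PySem.List.pyGetD ordered j "") (PySem.List.pyGetD ordered i "") > -1))

-- ===== PRECONDITION & SPEC =====
def Spec_dup_gene_names (anno_genes : List String) (out : Bool) : Prop := out = dup_gene_names_alt anno_genes
instance (anno_genes : List String) (out : Bool) : Decidable (Spec_dup_gene_names anno_genes out) := by unfold Spec_dup_gene_names; infer_instance

-- ===== CLAIM (what is proved, stated in full; the proofs are below) =====
def Claim_equal_dup_gene_names : Prop := ∀ (anno_genes : List String), Dom_dup_gene_names anno_genes → Spec_dup_gene_names anno_genes (dup_gene_names anno_genes)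

-- ===== LEMMAS AND PROOFS =====

-- x occurs (as a contiguous substring) inside y
def pvSub (x y : String) : Prop := x.toList <:+: y.toList

-- the permutation-invariant core: two distinct member strings, one inside the other,
-- or a repeated member string
def pvQ (m : List String) : Prop :=
  (∃ x ∈ m, ∃ y ∈ m, x ≠ y ∧ pvSub x y) ∨ (∃ x, 2 ≤ m.count x)

theorem pvQ_perm {m m' : List String} (h : m.Perm m') : pvQ m ↔ pvQ m' := by
  unfold pvQ
  constructor <;> rintro (⟨x, hx, y, hy, hne, hs⟩ | ⟨x, hc⟩)
  · exact Or.inl ⟨x, h.mem_iff.mp hx, y, h.mem_iff.mp hy, hne, hs⟩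
  · exact Or.inr ⟨x, by rwa [← h.count_eq]⟩
  · exact Or.inl ⟨x, h.mem_iff.mpr hx, y, h.mem_iff.mpr hy, hne, hs⟩
  · exact Or.inr ⟨x, by rwa [h.count_eq]⟩

-- a two-sided positional pair characterisation (A's shape)
theorem pvQ_iff_sym (m : List String) :
    pvQ m ↔ ∃ p q, ∃ (_ : p < q) (hq : q < m.length),
      (pvSub (m[q]'hq) (m[p]'(by omega)) ∨ pvSub (m[p]'(by omega)) (m[q]'hq)) := by
  constructor
  · rintro (⟨x, hx, y, hy, hne, hs⟩ | ⟨x, hc⟩)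
    · obtain ⟨a, ha, hax⟩ := List.mem_iff_getElem.mp hx
      obtain ⟨b, hb, hby⟩ := List.mem_iff_getElem.mp hy
      have hab : a ≠ b := by rintro rfl; exact hne (hax ▸ hby ▸ rfl)
      rcases Nat.lt_or_ge a b with h | h
      · exact ⟨a, b, h, hb, Or.inr (by rw [hax, hby]; exact hs)⟩
      · exact ⟨b, a, by omega, ha, Or.inl (by rw [hax, hby]; exact hs)⟩
    · obtain ⟨n, mm, hnm, h1, h2⟩ :=
        List.duplicate_iff_exists_distinct_get.mp (List.duplicate_iff_two_le_count.mpr hc)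
      refine ⟨n, mm, hnm, mm.isLt, Or.inl ?_⟩
      simp only [List.get_eq_getElem] at h1 h2
      rw [← h1, ← h2]
      exact List.infix_refl _
  · rintro ⟨p, q, hpq, hq, hs⟩
    by_cases he : m[p]'(by omega) = m[q]'hq
    · refine Or.inr ⟨m[q]'hq, List.duplicate_iff_two_le_count.mp ?_⟩
      exact List.duplicate_iff_exists_distinct_get.mpr
        ⟨⟨p, by omega⟩, ⟨q, hq⟩, hpq, by simp [List.get_eq_getElem, he], by simp [List.get_eq_getElem]⟩
    · rcases hs with hs | hs
      · exact Or.inl ⟨m[q]'hq, List.getElem_mem _, m[p]'(by omega), List.getElem_mem _,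
          fun h => he h.symm, hs⟩
      · exact Or.inl ⟨m[p]'(by omega), List.getElem_mem _, m[q]'hq, List.getElem_mem _, he, hs⟩

-- the one-sided positional pair characterisation (B's shape), valid on a length-sorted list
theorem pvQ_iff_one (m : List String)
    (hsorted : m.Pairwise (fun a b => PySem.Str.len a ≤ PySem.Str.len b)) :
    pvQ m ↔ ∃ p q, ∃ (_ : p < q) (hq : q < m.length), pvSub (m[p]'(by omega)) (m[q]'hq) := by
  have hlen : ∀ {p q : Nat} (_ : p < q) (hq : q < m.length),
      (m[p]'(by omega)).toList.length ≤ (m[q]'hq).toList.length := by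
    intro p q hpq hq
    have := (List.pairwise_iff_getElem.mp hsorted) p q (by omega) hq hpq
    simpa [PySem.Str.len_eq] using this
  constructor
  · rintro (⟨x, hx, y, hy, hne, hs⟩ | ⟨x, hc⟩)
    · obtain ⟨a, ha, hax⟩ := List.mem_iff_getElem.mp hx
      obtain ⟨b, hb, hby⟩ := List.mem_iff_getElem.mp hy
      have hab : a ≠ b := by rintro rfl; exact hne (hax ▸ hby ▸ rfl)
      rcases Nat.lt_or_ge a b with h | h
      · exact ⟨a, b, h, hb, by rw [hax, hby]; exact hs⟩
      · -- b < a : then len y ≤ len x, but x inside y forces len x ≤ len y, so equal, so x = y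
        have hba : b < a := by omega
        have h1 : y.toList.length ≤ x.toList.length := by
          have := hlen hba ha; rwa [hax, hby] at this
        have h2 : x.toList.length ≤ y.toList.length := hs.sublist.length_le
        have : x = y := String.toList_inj.mp (hs.sublist.eq_of_length (by omega))
        exact absurd this hne
    · obtain ⟨n, mm, hnm, h1, h2⟩ :=
        List.duplicate_iff_exists_distinct_get.mp (List.duplicate_iff_two_le_count.mpr hc)
      refine ⟨n, mm, hnm, mm.isLt, ?_⟩
      simp only [List.get_eq_getElem] at h1 h2
      rw [← h1, ← h2]
      exact List.infix_refl _
  · rintro ⟨p, q, hpq, hq, hs⟩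
    exact (pvQ_iff_sym m).mpr ⟨p, q, hpq, hq, Or.inr hs⟩

theorem pv_foldl_or (f : Int → Bool) (l : List Int) (b : Bool) :
    l.foldl (fun acc x => acc || f x) b = (b || l.any f) := by
  induction l generalizing b <;> simp [*, Bool.or_assoc]

theorem pv_cond (a b : String) :
    (decide (PySem.Str.find a b > -1) || decide (PySem.Str.find b a > -1)) = true ↔
      pvSub b a ∨ pvSub a b := by
  simp only [Bool.or_eq_true, decide_eq_true_eq, gt_iff_lt, pvSub,
    ← PySem.Str.find_nonneg_iff]
  omega

theorem pv_cond1 (a b : String) :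
    decide (PySem.Str.find a b > -1) = true ↔ pvSub b a := by
  simp only [decide_eq_true_eq, gt_iff_lt, pvSub, ← PySem.Str.find_nonneg_iff]
  omega

-- A computes the two-sided pair search
theorem dup_gene_names_eq_sym (l : List String) :
    dup_gene_names l = true ↔ ∃ p q, ∃ (_ : p < q) (hq : q < l.length),
      pvSub (l[q]'hq) (l[p]'(by omega)) ∨ pvSub (l[p]'(by omega)) (l[q]'hq) := by
  unfold dup_gene_names
  simp only [PySem.List.foldl_if_true_eq]
  rw [pv_foldl_or]
  simp only [Bool.false_or, List.any_eq_true, PySem.List.mem_pyRange_one]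
  constructor
  · rintro ⟨i, ⟨hi0, hi1⟩, hG⟩
    rw [PySem.List.slice_from _ (by omega : (0:Int) ≤ i + 1)] at hG
    obtain ⟨g2, hg2mem, hg2⟩ := hG
    obtain ⟨j, hj, hjeq⟩ := List.mem_iff_getElem.mp hg2mem
    have hlen : (l.drop (i+1).toNat).length = l.length - (i+1).toNat := List.length_drop
    have hq : (i+1).toNat + j < l.length := by omega
    have hilt : i < (l.length : Int) := by omega
    refine ⟨i.toNat, (i+1).toNat + j, by omega, by omega, ?_⟩
    rw [PySem.List.pyGetD_eq_getElem l "" hi0 hilt] at hg2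
    rw [List.getElem_drop] at hjeq
    rw [← hjeq] at hg2
    exact (pv_cond _ _).mp hg2
  · rintro ⟨p, q, hpq, hq, hs⟩
    refine ⟨(p : Int), ⟨by omega, by omega⟩, ?_⟩
    rw [PySem.List.slice_from _ (by omega : (0:Int) ≤ (p:Int) + 1)]
    refine ⟨l[q]'hq, ?_, ?_⟩
    · apply List.mem_iff_getElem.mpr
      refine ⟨q - (p+1), by simp [List.length_drop]; omega, ?_⟩
      rw [List.getElem_drop]
      congr 1
      omega
    · rw [PySem.List.pyGetD_eq_getElem l "" (by omega) (by omega)]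
      simp only [Int.toNat_natCast]
      exact (pv_cond _ _).mpr hs

-- B computes the one-sided pair search on the length-sorted copy
theorem dup_gene_names_alt_eq_one (l : List String) :
    dup_gene_names_alt l = true ↔
      ∃ p q, ∃ (_ : p < q) (hq : q < (PySem.List.sorted l (fun s => PySem.Str.len s)).length),
        pvSub ((PySem.List.sorted l (fun s => PySem.Str.len s))[p]'(by omega))
              ((PySem.List.sorted l (fun s => PySem.Str.len s))[q]'hq) := by
  unfold dup_gene_names_alt
  simp only [List.any_eq_true, PySem.List.mem_pyRange_one]
  constructor
  · rintro ⟨i, ⟨hi0, hin⟩, j, ⟨hj1, hjn⟩, hc⟩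
    refine ⟨i.toNat, j.toNat, by omega, by omega, ?_⟩
    rw [PySem.List.pyGetD_eq_getElem _ "" (by omega) (by omega),
        PySem.List.pyGetD_eq_getElem _ "" (by omega) (by omega)] at hc
    exact (pv_cond1 _ _).mp hc
  · rintro ⟨p, q, hpq, hq, hs⟩
    refine ⟨(p : Int), ⟨by omega, by omega⟩, (q : Int), ⟨by omega, by omega⟩, ?_⟩
    rw [PySem.List.pyGetD_eq_getElem _ "" (by omega) (by omega),
        PySem.List.pyGetD_eq_getElem _ "" (by omega) (by omega)]
    simp only [Int.toNat_natCast]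
    exact (pv_cond1 _ _).mpr hs

-- ===== VERDICT (by name: the statement is the Claim_ definition above) =====
theorem dup_gene_names_spec : Claim_equal_dup_gene_names := by
  intro l _
  unfold Spec_dup_gene_names
  have hA := dup_gene_names_eq_sym l
  have hB := dup_gene_names_alt_eq_one l
  have hperm := PySem.List.sorted_perm l (fun s => PySem.Str.len s) false
  have hpair := PySem.List.sorted_pairwise l (fun s => PySem.Str.len s)
  have key : dup_gene_names l = true ↔ dup_gene_names_alt l = true := by
    rw [hA, hB, ← pvQ_iff_sym, ← pvQ_iff_one _ hpair, pvQ_perm hperm]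
  cases hda : dup_gene_names l <;> cases hdb : dup_gene_names_alt l <;> simp_all
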